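-- pv_equiv track=rewrite | github.com/dinisraimundo/LITS-Solver | solver.py | idx_of_lowest
-- ===== SOURCE A (Python) =====
-- def idx_of_lowest(lst:list):
--     """This function returns the index of the lowest element grather  than zero.
--     There cant be no negative elements"""
--     idx = 0
--     min = 0
--     if max(lst) != 0:
--         for i in range(len(lst)):
--             val = lst[i]
--
--             if val == 1:
--                 min = 1
--                 idx = i
--                 break
--
--             elif val > 1:
--                 if min == 0:
--                     min = val
--                     idx = i
--                 elif val < min:
--                     min = val
--                     idx = i
--     return idx
-- ===== SOURCE B (Python) =====
-- def idx_of_lowest(lst: list):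
--     cands = [v for v in lst if v >= 1]
--     if not cands:
--         return 0
--     return lst.index(min(cands))
-- ===== Notes on version B (the rewrite author's own statement) =====
-- stated objective: simpler
-- what changed: Replaces A's fused index-tracking running-min loop (with ==1 early break and max() guard) by a compute-then-locate decomposition: filter the candidates >= 1, take their min, then return its first index via lst.index.
import Mathlib
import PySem

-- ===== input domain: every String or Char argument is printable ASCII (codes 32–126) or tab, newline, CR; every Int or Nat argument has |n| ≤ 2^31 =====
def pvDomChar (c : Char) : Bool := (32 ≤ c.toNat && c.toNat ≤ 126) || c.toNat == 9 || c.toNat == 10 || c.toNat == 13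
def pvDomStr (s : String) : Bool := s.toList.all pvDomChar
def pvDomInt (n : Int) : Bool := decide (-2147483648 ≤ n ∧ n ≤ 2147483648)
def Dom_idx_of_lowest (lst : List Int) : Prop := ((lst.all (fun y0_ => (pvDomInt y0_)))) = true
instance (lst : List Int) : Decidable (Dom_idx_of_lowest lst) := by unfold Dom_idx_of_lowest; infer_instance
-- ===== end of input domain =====

-- B replaces A's fused index-tracking running-min loop by a filter-min-then-index decomposition (objective: simpler).

-- ===== PORT A =====
-- the for-loop of A: state (idx, mn), i is the current loop index; `break`/return = stop recursing
def pvLoopA : List Int → Int → Int → Int → Int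
  | [], idx, _mn, _i => idx
  | v :: rest, idx, mn, i =>
    if v = 1 then i                                   -- min = 1; idx = i; break  (loop ends, idx returned)
    else if v > 1 then
      if mn = 0 then pvLoopA rest i v (i + 1)
      else if v < mn then pvLoopA rest i v (i + 1)
      else pvLoopA rest idx mn (i + 1)
    else pvLoopA rest idx mn (i + 1)

def idx_of_lowest (lst : List Int) : Int :=
  match PySem.List.max? lst (fun y => y) with
  | none => 0                                          -- empty list: Python's max raises ValueError (outside Pre_)
  | some m => if m ≠ 0 then pvLoopA lst 0 0 0 else 0

-- ===== PORT B =====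
def idx_of_lowest_alt (lst : List Int) : Int :=
  let cands := lst.filter (fun v => decide (1 ≤ v))
  match PySem.List.min? cands (fun y => y) with
  | none => 0                                          -- `if not cands: return 0`
  | some m =>
    match PySem.List.index? lst m with
    | some k => (k : Int)                              -- lst.index(min(cands))
    | none => 0                                        -- unreachable: m ∈ lst (Python would raise ValueError)

-- ===== PRECONDITION & SPEC =====
-- Pre_ excludes only the empty list, on which A's max(lst) raises ValueError (B would return 0 there).
def Pre_idx_of_lowest (lst : List Int) : Prop := lst ≠ []
instance (lst : List Int) : Decidable (Pre_idx_of_lowest lst) := by unfold Pre_idx_of_lowest; infer_instance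
def pvWitness_idx_of_lowest : List Int := [3, 1, 2]

def Spec_idx_of_lowest (lst : List Int) (out : Int) : Prop := out = idx_of_lowest_alt lst
instance (lst : List Int) (out : Int) : Decidable (Spec_idx_of_lowest lst out) := by unfold Spec_idx_of_lowest; infer_instance

-- ===== CLAIM (what is proved, stated in full; the proofs are below) =====
def Claim_equal_idx_of_lowest : Prop := ∀ (lst : List Int), Dom_idx_of_lowest lst → Pre_idx_of_lowest lst → Spec_idx_of_lowest lst (idx_of_lowest lst)

-- ===== LEMMAS AND PROOFS =====


-- the candidates of l (Python's `[v for v in lst if v >= 1]`)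
def pvCands (l : List Int) : List Int := l.filter (fun v => decide (1 ≤ v))

-- common functional spec: r is 0 when there is no candidate, else the first index in l of the least candidate
def pvP (l : List Int) (r : Int) : Prop :=
  (pvCands l = [] ∧ r = 0) ∨
  (∃ mv, mv ∈ pvCands l ∧ (∀ y ∈ pvCands l, mv ≤ y) ∧ r = (l.idxOf mv : Int))

lemma mem_pvCands {l : List Int} {y : Int} : y ∈ pvCands l ↔ y ∈ l ∧ 1 ≤ y := by
  simp [pvCands, List.mem_filter]

lemma pvCands_append (l t : List Int) : pvCands (l ++ t) = pvCands l ++ pvCands t := by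
  simp [pvCands, List.filter_append]

lemma idxOf?_eq_some_idxOf {l : List Int} {m : Int} (h : m ∈ l) :
    l.idxOf? m = some (l.idxOf m) := by
  rw [List.idxOf_eq_getD_idxOf?]
  rcases hx : l.idxOf? m with _ | k
  · rw [List.idxOf?_eq_none_iff] at hx; exact absurd h hx
  · simp

lemma idxOf_append_cons_self {l t : List Int} {c : Int} (h : c ∉ l) :
    (l ++ c :: t).idxOf c = l.length := by
  rw [List.idxOf_append_of_notMem h, List.idxOf_cons_eq _ rfl]
  simp

lemma pvP_unique {l : List Int} {r r' : Int} (h : pvP l r) (h' : pvP l r') : r = r' := by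
  rcases h with ⟨hc, hr⟩ | ⟨mv, hm, hmin, hr⟩
  · rcases h' with ⟨_, hr'⟩ | ⟨mv', hm', _, _⟩
    · omega
    · rw [hc] at hm'; simp at hm'
  · rcases h' with ⟨hc', _⟩ | ⟨mv', hm', hmin', hr'⟩
    · rw [hc'] at hm; simp at hm
    · have : mv = mv' := le_antisymm (hmin mv' hm') (hmin' mv hm)
      subst this; rw [hr, hr']

lemma pvP_alt (l : List Int) : pvP l (idx_of_lowest_alt l) := by
  unfold idx_of_lowest_alt
  rcases hmin : PySem.List.min? (l.filter (fun v => decide (1 ≤ v))) (fun y => y) with _ | m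
  · simp only [hmin]
    left
    refine ⟨?_, rfl⟩
    rw [PySem.List.min?_eq_none_iff] at hmin
    simpa [pvCands] using hmin
  · simp only [hmin]
    right
    have hmem : m ∈ pvCands l := PySem.List.min?_mem hmin
    have hml : m ∈ l := (mem_pvCands.mp hmem).1
    have hidx : PySem.List.index? l m = some (l.idxOf m) := by
      rw [PySem.List.index?_eq_idxOf?]
      exact idxOf?_eq_some_idxOf hml
    rw [hidx]
    exact ⟨m, hmem, fun y hy => PySem.List.min?_isMin hmin y (by simpa [pvCands] using hy), rfl⟩

lemma pvLoopA_P : ∀ (l pre : List Int) (idx mn : Int),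
    ((mn = 0 ∧ idx = 0 ∧ pvCands pre = []) ∨
     (2 ≤ mn ∧ mn ∈ pvCands pre ∧ (∀ y ∈ pvCands pre, mn ≤ y) ∧ idx = (pre.idxOf mn : Int))) →
    pvP (pre ++ l) (pvLoopA l idx mn (pre.length : Int)) := by
  intro l
  induction l with
  | nil =>
    intro pre idx mn h
    rw [List.append_nil]
    rcases h with ⟨_, h1, h2⟩ | ⟨_, h3, h4, h5⟩
    · exact Or.inl ⟨h2, h1⟩
    · exact Or.inr ⟨mn, h3, h4, h5⟩
  | cons v rest ih =>
    intro pre idx mn h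
    have hstep : ∀ (idx' mn' : Int),
        ((mn' = 0 ∧ idx' = 0 ∧ pvCands (pre ++ [v]) = []) ∨
         (2 ≤ mn' ∧ mn' ∈ pvCands (pre ++ [v]) ∧ (∀ y ∈ pvCands (pre ++ [v]), mn' ≤ y) ∧
          idx' = ((pre ++ [v]).idxOf mn' : Int))) →
        pvP (pre ++ v :: rest) (pvLoopA rest idx' mn' ((pre.length : Int) + 1)) := by
      intro idx' mn' h'
      have := ih (pre ++ [v]) idx' mn' h'
      simpa using this
    by_cases hv1 : v = 1
    · -- break: return current index
      subst hv1
      have hnot : (1 : Int) ∉ pre := by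
        intro hmem
        have hc : (1 : Int) ∈ pvCands pre := mem_pvCands.mpr ⟨hmem, le_refl 1⟩
        rcases h with ⟨_, _, h2⟩ | ⟨h2, _, h4, _⟩
        · rw [h2] at hc; simp at hc
        · have := h4 1 hc; omega
      show pvP (pre ++ 1 :: rest) (pvLoopA (1 :: rest) idx mn (pre.length : Int))
      simp only [pvLoopA, if_true]
      refine Or.inr ⟨1, mem_pvCands.mpr ⟨by simp, le_refl 1⟩,
        fun y hy => (mem_pvCands.mp hy).2, ?_⟩
      rw [idxOf_append_cons_self hnot]
    · by_cases hv2 : v > 1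
      · -- candidate element
        have hvnotpre : (mn = 0 ∨ v < mn) → v ∉ pre := by
          intro hc hmem
          have hcv : v ∈ pvCands pre := mem_pvCands.mpr ⟨hmem, by omega⟩
          rcases h with ⟨_, _, h2⟩ | ⟨h2, _, h4, _⟩
          · rw [h2] at hcv; simp at hcv
          · have := h4 v hcv
            rcases hc with hc | hc <;> omega
        have hupd : (mn = 0 ∨ v < mn) →
            pvP (pre ++ v :: rest) (pvLoopA rest (pre.length : Int) v ((pre.length : Int) + 1)) := by
          intro hc
          apply hstep
          refine Or.inr ⟨by omega, mem_pvCands.mpr ⟨by simp, by omega⟩, ?_, ?_⟩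
          · intro y hy
            rw [pvCands_append] at hy
            rcases List.mem_append.mp hy with hy | hy
            · rcases hc with hc | hc
              · rcases h with ⟨_, _, h2⟩ | ⟨h2, _, _, _⟩
                · rw [h2] at hy; simp at hy
                · omega
              · rcases h with ⟨h0, _, h2⟩ | ⟨h2, _, h4, _⟩
                · rw [h2] at hy; simp at hy
                · have := h4 y hy; omega
            · have : y = v := by simpa [pvCands, (by omega : (1:Int) ≤ v)] using hy
              omega
          · rw [idxOf_append_cons_self (hvnotpre hc)]
        rcases heq : decide (mn = 0) with _ | _
        · have hmn0 : mn ≠ 0 := by simpa using heq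
          by_cases hlt : v < mn
          · show pvP (pre ++ v :: rest) (pvLoopA (v :: rest) idx mn (pre.length : Int))
            simp only [pvLoopA, if_neg hv1, if_pos hv2, if_neg hmn0, if_pos hlt]
            exact hupd (Or.inr hlt)
          · -- keep state
            show pvP (pre ++ v :: rest) (pvLoopA (v :: rest) idx mn (pre.length : Int))
            simp only [pvLoopA, if_neg hv1, if_pos hv2, if_neg hmn0, if_neg hlt]
            rcases h with ⟨h0, _, _⟩ | ⟨h2, h3, h4, h5⟩
            · exact absurd h0 hmn0
            · apply hstep
              have hmnpre : mn ∈ pre := (mem_pvCands.mp h3).1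
              refine Or.inr ⟨h2, by rw [pvCands_append]; exact List.mem_append_left _ h3, ?_, ?_⟩
              · intro y hy
                rw [pvCands_append] at hy
                rcases List.mem_append.mp hy with hy | hy
                · exact h4 y hy
                · have : y = v := by simpa [pvCands, (by omega : (1:Int) ≤ v)] using hy
                  omega
              · rw [List.idxOf_append_of_mem hmnpre]; exact h5
        · have hmn0 : mn = 0 := by simpa using heq
          show pvP (pre ++ v :: rest) (pvLoopA (v :: rest) idx mn (pre.length : Int))
          simp only [pvLoopA, if_neg hv1, if_pos hv2, if_pos hmn0]
          exact hupd (Or.inl hmn0)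
      · -- v ≤ 0: not a candidate, state unchanged
        have hv0 : v < 1 := by omega
        have hcv : pvCands (pre ++ [v]) = pvCands pre := by
          rw [pvCands_append]
          have : pvCands [v] = [] := by simp [pvCands]; omega
          rw [this, List.append_nil]
        show pvP (pre ++ v :: rest) (pvLoopA (v :: rest) idx mn (pre.length : Int))
        simp only [pvLoopA, if_neg hv1, if_neg hv2]
        apply hstep
        rcases h with ⟨h0, h1, h2⟩ | ⟨h2, h3, h4, h5⟩
        · exact Or.inl ⟨h0, h1, by rw [hcv]; exact h2⟩
        · refine Or.inr ⟨h2, by rw [hcv]; exact h3, by rw [hcv]; exact h4, ?_⟩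
          rw [List.idxOf_append_of_mem (mem_pvCands.mp h3).1]; exact h5

lemma pvP_A {l : List Int} (h : l ≠ []) : pvP l (idx_of_lowest l) := by
  unfold idx_of_lowest
  rcases hmax : PySem.List.max? l (fun y => y) with _ | M
  · rw [PySem.List.max?_eq_none_iff] at hmax; exact absurd hmax h
  · by_cases hM : M ≠ 0
    · simp only [if_pos hM]
      have := pvLoopA_P l [] 0 0 (Or.inl ⟨rfl, rfl, by simp [pvCands]⟩)
      simpa using this
    · simp only [if_neg hM]
      left
      refine ⟨?_, rfl⟩
      have hmax' := PySem.List.max?_isMax hmax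
      rcases hc : pvCands l with _ | ⟨y, t⟩
      · rfl
      · have hy : y ∈ pvCands l := by rw [hc]; simp
        rcases mem_pvCands.mp hy with ⟨hyl, hy1⟩
        have := hmax' y hyl
        simp at hM
        omega

-- ===== VERDICT (by name: the statement is the Claim_ definition above) =====
theorem idx_of_lowest_spec : Claim_equal_idx_of_lowest := by
  intro lst _ hpre
  exact pvP_unique (pvP_A hpre) (pvP_alt lst)
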